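-- pv_equiv track=rewrite | github.com/dragongling/Scripts | python/MiscScripts/MiscScripts.py | contiguous_sum
-- ===== SOURCE A (Python) =====
-- def contiguous_sum(array):
--     size = len(array)
--     if size <= 1:
--         return array[0]
--     sums = [sum(array)]
--     for i in range(2):
--         subarray_sum = sum(array[i:(size - 1 + i)])
--         if subarray_sum > sums[0]:
--             sums.append(contiguous_sum(array[i:(size - 1 + i)]))
--     return max(sums)
-- ===== SOURCE B (Python) =====
-- def _trim_front(xs):
--     if xs and xs[0] < 0:
--         return _trim_front(xs[1:])
--     return xs
--
--
-- def contiguous_sum(array):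
--     if all(x < 0 for x in array):
--         return max(array)
--     return sum(_trim_front(_trim_front(array[::-1])[::-1]))
-- ===== Notes on version B (the rewrite author's own statement) =====
-- stated objective: alternative
-- what changed: A recursively re-tries trimming a negative end element on both sides (a branching recursion with repeated sums); B does one pass: if every element is negative it returns max(array), otherwise it strips the negative prefix and suffix once and sums the remainder.
-- outside the precondition, e.g. on contiguous_sum([]): A raises IndexError, B raises ValueError
import Mathlib
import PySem

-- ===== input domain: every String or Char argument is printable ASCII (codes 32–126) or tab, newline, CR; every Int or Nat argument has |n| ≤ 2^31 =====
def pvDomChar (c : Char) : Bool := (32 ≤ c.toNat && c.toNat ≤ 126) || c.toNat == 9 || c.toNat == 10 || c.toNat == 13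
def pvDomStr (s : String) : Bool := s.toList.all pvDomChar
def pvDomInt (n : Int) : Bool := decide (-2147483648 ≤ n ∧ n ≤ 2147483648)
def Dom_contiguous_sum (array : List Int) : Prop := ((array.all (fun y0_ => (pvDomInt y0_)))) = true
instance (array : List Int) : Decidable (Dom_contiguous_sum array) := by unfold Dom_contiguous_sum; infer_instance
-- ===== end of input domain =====

-- B replaces A's branching recursion (repeatedly trying to trim a negative end element) by a
-- single pass that trims the negative ends, with an all-negative special case (max element).

-- ===== PORT A =====
def contiguous_sum (array : List Int) : Int :=
  if array.length ≤ 1 then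
    (PySem.List.pyGet? array 0).getD 0
  else
    let s := array.sum
    let sub0 := PySem.List.slice array (some 0) (some ((array.length : Int) - 1 + 0))
    let sums1 := if sub0.sum > s then [s, contiguous_sum sub0] else [s]
    let sub1 := PySem.List.slice array (some 1) (some ((array.length : Int) - 1 + 1))
    let sums2 := if sub1.sum > s then sums1 ++ [contiguous_sum sub1] else sums1
    (PySem.List.max? sums2 (fun y => y)).getD 0
termination_by array.length
decreasing_by
  all_goals
    rcases array with _ | ⟨a, t⟩
    · exact absurd (by simp) ‹¬([] : List Int).length ≤ 1›
    · simp_all [PySem.List.slice, PySem.List.clampIdx] <;> first | omega | (split_ifs <;> omega)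

-- ===== PORT B =====
def trimFront : List Int → List Int
  | [] => []
  | x :: xs => if x < 0 then trimFront xs else x :: xs

def contiguous_sum_alt (array : List Int) : Int :=
  if array.all (fun x => decide (x < 0)) then
    (PySem.List.max? array (fun y => y)).getD 0
  else
    (trimFront ((trimFront array.reverse).reverse)).sum


-- ===== PRECONDITION & SPEC =====
-- Pre_ excludes only the empty list: there A raises IndexError (array[0]) and B raises ValueError (max([])).
def Pre_contiguous_sum (array : List Int) : Prop := array ≠ []
instance (array : List Int) : Decidable (Pre_contiguous_sum array) := by unfold Pre_contiguous_sum; infer_instance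
def pvWitness_contiguous_sum : List Int := [1]

def Spec_contiguous_sum (array : List Int) (out : Int) : Prop := out = contiguous_sum_alt array
instance (array : List Int) (out : Int) : Decidable (Spec_contiguous_sum array out) := by unfold Spec_contiguous_sum; infer_instance

-- ===== CLAIM (what is proved, stated in full; the proofs are below) =====
def Claim_equal_contiguous_sum : Prop := ∀ (array : List Int), Dom_contiguous_sum array → Pre_contiguous_sum array → Spec_contiguous_sum array (contiguous_sum array)

-- ===== LEMMAS AND PROOFS =====
lemma trimFront_sum_le (xs : List Int) : xs.sum ≤ (trimFront xs).sum := by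
  induction xs with
  | nil => simp [trimFront]
  | cons x t ih => by_cases hx : x < 0 <;> simp [trimFront, hx]; omega

lemma trimFront_eq_nil_iff (xs : List Int) :
    trimFront xs = [] ↔ xs.all (fun x => decide (x < 0)) = true := by
  induction xs with
  | nil => simp [trimFront]
  | cons x t ih => by_cases hx : x < 0 <;> simp [trimFront, hx, ih]

lemma trimFront_append (xs ys : List Int) (h : trimFront xs ≠ []) :
    trimFront (xs ++ ys) = trimFront xs ++ ys := by
  induction xs with
  | nil => simp [trimFront] at h
  | cons x t ih =>
    by_cases hx : x < 0
    · simp [trimFront, hx] at h ⊢; exact ih h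
    · simp [trimFront, hx]

lemma trim_sum_le (xs : List Int) :
    xs.sum ≤ (trimFront ((trimFront xs.reverse).reverse)).sum := by
  have h1 := trimFront_sum_le xs.reverse
  have h2 := trimFront_sum_le (trimFront xs.reverse).reverse
  simp [List.sum_reverse] at *
  omega

lemma sum_le_max_of_neg (xs : List Int) (hne : xs ≠ [])
    (hneg : xs.all (fun x => decide (x < 0)) = true) :
    xs.sum ≤ (PySem.List.max? xs (fun y => y)).getD 0 := by
  induction xs with
  | nil => simp at hne
  | cons x t ih =>
    rw [PySem.List.max?_id_cons]
    simp only [Option.getD_some]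
    rcases t with _ | ⟨y, u⟩
    · simp
    · simp only [List.all_cons, Bool.and_eq_true, decide_eq_true_eq] at hneg
      have ht := ih (by simp) (by simp [hneg.2.1, hneg.2.2])
      rw [PySem.List.max?_id_cons] at ht
      simp only [Option.getD_some] at ht
      have hfold : (y :: u).foldl max x = max x (u.foldl max y) := by
        simp [List.foldl_cons]; rw [List.foldl_assoc]
      rw [hfold]
      simp [List.sum_cons] at ht ⊢
      have hx := hneg.1
      omega

lemma slice_dropLast (x z : Int) (zs : List Int) :
    PySem.List.slice (x :: (zs ++ [z])) (some 0) (some (((x :: (zs ++ [z])).length : Int) - 1 + 0)) = x :: zs := by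
  have h : (((x :: (zs ++ [z])).length : Int) - 1 + 0) = ((zs.length + 1 : Nat) : Int) := by simp
  rw [h, PySem.List.slice_zero_start, PySem.List.slice_to_natCast]
  simp

lemma slice_tail (x z : Int) (zs : List Int) :
    PySem.List.slice (x :: (zs ++ [z])) (some 1) (some (((x :: (zs ++ [z])).length : Int) - 1 + 1)) = zs ++ [z] := by
  have h : (((x :: (zs ++ [z])).length : Int) - 1 + 1) = ((zs.length + 2 : Nat) : Int) := by
    simp; omega
  rw [h, show (1 : Int) = ((1 : Nat) : Int) from rfl, PySem.List.slice_natCast]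
  simp

lemma A_step (x z : Int) (zs : List Int) :
    contiguous_sum (x :: (zs ++ [z])) =
      (PySem.List.max? (
        (if z < 0 then [(x :: (zs ++ [z])).sum, contiguous_sum (x :: zs)] else [(x :: (zs ++ [z])).sum])
        ++ (if x < 0 then [contiguous_sum (zs ++ [z])] else [])) (fun y => y)).getD 0 := by
  rw [contiguous_sum]
  rw [if_neg (by simp)]
  simp only [slice_dropLast, slice_tail]
  have c0 : ((x :: zs).sum > (x :: (zs ++ [z])).sum) ↔ z < 0 := by
    simp [List.sum_append]
  have c1 : ((zs ++ [z]).sum > (x :: (zs ++ [z])).sum) ↔ x < 0 := by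
    simp [List.sum_append]
  by_cases hz : z < 0 <;> by_cases hx : x < 0 <;>
    simp only [if_pos, c0, c1, hz, hx, if_false, List.append_nil]

-- B-side trim rewriting
lemma trim_cons_head_neg (x : Int) (t : List Int) (hx : x < 0)
    (ht : ¬ t.all (fun y => decide (y < 0)) = true) :
    trimFront ((trimFront (x :: t).reverse).reverse) = trimFront ((trimFront t.reverse).reverse) := by
  have hne : trimFront t.reverse ≠ [] := by
    rw [Ne, trimFront_eq_nil_iff]
    simpa using ht
  have : (x :: t).reverse = t.reverse ++ [x] := by simp
  rw [this, trimFront_append _ _ hne]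
  simp [trimFront, hx]

lemma trim_concat_last_neg (z : Int) (t : List Int) (hz : z < 0) :
    trimFront ((trimFront (t ++ [z]).reverse).reverse) = trimFront ((trimFront t.reverse).reverse) := by
  have : (t ++ [z]).reverse = z :: t.reverse := by simp
  rw [this]
  simp [trimFront, hz]

-- A = B on every non-empty list, by strong induction on the length
lemma main_equiv (xs : List Int) (hne : xs ≠ []) :
    contiguous_sum xs = contiguous_sum_alt xs := by
  induction hn : xs.length using Nat.strong_induction_on generalizing xs with
  | _ n IH =>
  rcases xs with _ | ⟨x, t⟩
  · simp at hne
  rcases t.eq_nil_or_concat with rfl | ⟨zs, z, hc⟩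
  · -- singleton
    by_cases hx : x < 0 <;>
      simp [contiguous_sum, contiguous_sum_alt, trimFront, hx,
        PySem.List.pyGet?, PySem.List.pyIdx?, PySem.List.max?_id_cons]
  · -- xs = x :: zs ++ [z], length ≥ 2
    rw [List.concat_eq_append] at hc
    subst hc
    subst hn
    have IH0 : contiguous_sum (x :: zs) = contiguous_sum_alt (x :: zs) :=
      IH (x :: zs).length (by simp) (x :: zs) (by simp) rfl
    have IH1 : contiguous_sum (zs ++ [z]) = contiguous_sum_alt (zs ++ [z]) :=
      IH (zs ++ [z]).length (by simp) (zs ++ [z]) (by simp) rfl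
    rw [A_step, IH0, IH1]
    by_cases hz : z < 0 <;> by_cases hx : x < 0
    · -- both ends negative
      by_cases hall : (x :: (zs ++ [z])).all (fun y => decide (y < 0)) = true
      · -- all negative
        have hs := sum_le_max_of_neg (x :: (zs ++ [z])) (by simp) hall
        simp only [if_pos hz, if_pos hx, contiguous_sum_alt]
        rw [if_pos hall]
        have hallzs : zs.all (fun y => decide (y < 0)) = true := by
          simp only [List.all_cons, List.all_append] at hall
          simp_all
        have hall0 : (x :: zs).all (fun y => decide (y < 0)) = true := by simp_all
        have hall1 : (zs ++ [z]).all (fun y => decide (y < 0)) = true := by simp_all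
        rw [if_pos hall0, if_pos hall1]
        rcases zs with _ | ⟨w, ws⟩
        · simp only [List.nil_append, List.cons_append, PySem.List.max?_id_cons,
            Option.getD_some, List.foldl_cons, List.foldl_nil,
            List.sum_cons, List.sum_nil] at hs ⊢
          omega
        · simp only [List.nil_append, List.cons_append, PySem.List.max?_id_cons,
            Option.getD_some, List.foldl_cons, List.foldl_nil, List.foldl_append,
            List.sum_cons, List.sum_nil, List.sum_append] at hs ⊢
          simp only [List.foldl_assoc] at hs ⊢
          omega
      · -- not all negative, but both ends negative: some inner element is nonneg
        have hallzs : ¬ zs.all (fun y => decide (y < 0)) = true := by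
          intro h; apply hall; simp_all
        have h0 : ¬ (x :: zs).all (fun y => decide (y < 0)) = true := by simp_all
        have h1 : ¬ (zs ++ [z]).all (fun y => decide (y < 0)) = true := by simp_all
        simp only [if_pos hz, if_pos hx, contiguous_sum_alt, if_neg hall, if_neg h0, if_neg h1]
        have t0 : trimFront ((trimFront (x :: zs).reverse).reverse)
            = trimFront ((trimFront (x :: (zs ++ [z])).reverse).reverse) := by
          rw [show x :: (zs ++ [z]) = (x :: zs) ++ [z] from rfl, trim_concat_last_neg z _ hz]
        have t1 : trimFront ((trimFront (zs ++ [z]).reverse).reverse)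
            = trimFront ((trimFront (x :: (zs ++ [z])).reverse).reverse) := by
          rw [trim_cons_head_neg x _ hx h1]
        rw [t0, t1]
        have hs := trim_sum_le (x :: (zs ++ [z]))
        rw [show ([(x :: (zs ++ [z])).sum, (trimFront ((trimFront (x :: (zs ++ [z])).reverse).reverse)).sum]
              ++ [(trimFront ((trimFront (x :: (zs ++ [z])).reverse).reverse)).sum])
            = (x :: (zs ++ [z])).sum :: [(trimFront ((trimFront (x :: (zs ++ [z])).reverse).reverse)).sum,
              (trimFront ((trimFront (x :: (zs ++ [z])).reverse).reverse)).sum] from rfl]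
        rw [PySem.List.max?_id_cons]
        simp only [Option.getD_some, List.foldl_cons, List.foldl_nil]
        omega
    · -- z < 0, x ≥ 0
      have h0 : ¬ (x :: zs).all (fun y => decide (y < 0)) = true := by simp_all
      have hall : ¬ (x :: (zs ++ [z])).all (fun y => decide (y < 0)) = true := by simp_all
      simp only [if_pos hz, if_neg hx, contiguous_sum_alt, if_neg hall, if_neg h0, List.append_nil]
      have t0 : trimFront ((trimFront (x :: zs).reverse).reverse)
          = trimFront ((trimFront (x :: (zs ++ [z])).reverse).reverse) := by
        rw [show x :: (zs ++ [z]) = (x :: zs) ++ [z] from rfl, trim_concat_last_neg z _ hz]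
      rw [t0, PySem.List.max?_id_cons]
      have hs := trim_sum_le (x :: (zs ++ [z]))
      simp only [Option.getD_some, List.foldl_cons, List.foldl_nil]
      omega
    · -- z ≥ 0, x < 0
      have h1 : ¬ (zs ++ [z]).all (fun y => decide (y < 0)) = true := by simp_all
      have hall : ¬ (x :: (zs ++ [z])).all (fun y => decide (y < 0)) = true := by simp_all
      simp only [if_neg hz, if_pos hx, contiguous_sum_alt, if_neg hall, if_neg h1]
      have t1 : trimFront ((trimFront (zs ++ [z]).reverse).reverse)
          = trimFront ((trimFront (x :: (zs ++ [z])).reverse).reverse) := by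
        rw [trim_cons_head_neg x _ hx h1]
      rw [t1, show [(x :: (zs ++ [z])).sum] ++ [(trimFront ((trimFront (x :: (zs ++ [z])).reverse).reverse)).sum]
            = [(x :: (zs ++ [z])).sum, (trimFront ((trimFront (x :: (zs ++ [z])).reverse).reverse)).sum] from rfl,
        PySem.List.max?_id_cons]
      have hs := trim_sum_le (x :: (zs ++ [z]))
      simp only [Option.getD_some, List.foldl_cons, List.foldl_nil]
      omega
    · -- both ends nonnegative
      have hall : ¬ (x :: (zs ++ [z])).all (fun y => decide (y < 0)) = true := by simp_all
      simp only [if_neg hz, if_neg hx, contiguous_sum_alt, if_neg hall, List.append_nil]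
      have e : trimFront ((trimFront (x :: (zs ++ [z])).reverse).reverse) = x :: (zs ++ [z]) := by
        have : (x :: (zs ++ [z])).reverse = z :: (zs.reverse ++ [x]) := by simp
        rw [this, show trimFront (z :: (zs.reverse ++ [x])) = z :: (zs.reverse ++ [x]) from by
          simp [trimFront, hz]]
        rw [show (z :: (zs.reverse ++ [x])).reverse = x :: (zs ++ [z]) from by simp]
        simp [trimFront, hx]
      rw [e, PySem.List.max?_id_cons]
      simp

-- ===== VERDICT (by name: the statement is the Claim_ definition above) =====
theorem contiguous_sum_spec : Claim_equal_contiguous_sum := by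
  intro array _ hpre
  exact main_equiv array hpre
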